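-- pv_equiv track=rewrite | github.com/rtclauss/hass-config | scripts/update_music_assistant_playlist.py | _find_last_item_line
-- ===== SOURCE A (Python) =====
-- def _find_last_item_line(lines: list[str], plists_start: int, plists_end: int) -> int | None:
--     for index in range(plists_end - 1, plists_start - 1, -1):
--         stripped = lines[index].strip()
--         if stripped.startswith('"') and stripped.endswith('"'):
--             return index
--         if stripped.startswith('"') and stripped.endswith('",'):
--             return index
--     return None
-- ===== SOURCE B (Python) =====
-- def _is_item_line(line):
--     t = line.strip()
--     return t.startswith('"') and (t.endswith('"') or t.endswith('",'))
--
--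
-- def _find_last_item_line(lines: list[str], plists_start: int, plists_end: int) -> int | None:
--     matches = [i for i in range(plists_start, plists_end) if _is_item_line(lines[i])]
--     return matches[-1] if matches else None
-- ===== Notes on version B (the rewrite author's own statement) =====
-- stated objective: alternative
-- what changed: Replaces A's backward scan with early return by a staged forward pass: a comprehension collects all matching indices in range(plists_start, plists_end) with a named predicate, then the last collected index (or None) is returned.
-- outside the precondition, e.g. on _find_last_item_line(['"a"'], -5, 1): A returns 0, B raises IndexError
import Mathlib
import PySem

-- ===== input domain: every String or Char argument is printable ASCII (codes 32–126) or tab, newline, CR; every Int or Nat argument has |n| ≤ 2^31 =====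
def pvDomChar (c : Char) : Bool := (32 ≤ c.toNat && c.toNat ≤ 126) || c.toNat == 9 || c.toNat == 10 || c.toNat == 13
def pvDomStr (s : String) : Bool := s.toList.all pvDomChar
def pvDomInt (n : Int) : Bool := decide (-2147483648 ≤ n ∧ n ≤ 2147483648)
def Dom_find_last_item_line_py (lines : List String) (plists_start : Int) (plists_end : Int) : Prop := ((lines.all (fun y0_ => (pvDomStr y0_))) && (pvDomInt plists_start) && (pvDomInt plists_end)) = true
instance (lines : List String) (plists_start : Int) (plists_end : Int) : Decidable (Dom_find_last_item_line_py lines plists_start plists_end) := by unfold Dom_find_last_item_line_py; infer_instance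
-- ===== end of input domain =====

-- B replaces A's backward early-return scan by a staged forward pass: collect all matching
-- indices, then return the last one; same cost, different decomposition ('alternative').

-- ===== PORT A =====
-- A's backward loop with early return; pyGet? none = IndexError (excluded by Pre_)
def pvLoopA (lines : List String) : List Int → Option Int
  | [] => none
  | i :: rest =>
    match PySem.List.pyGet? lines i with
    | none => none
    | some line =>
      let stripped := PySem.Str.strip line
      if PySem.Str.startswith stripped "\"" && PySem.Str.endswith stripped "\"" then some i
      else if PySem.Str.startswith stripped "\"" && PySem.Str.endswith stripped "\"," then some i
      else pvLoopA lines rest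

def find_last_item_line_py (lines : List String) (plists_start : Int) (plists_end : Int) : Option Int :=
  pvLoopA lines (PySem.List.pyRange (plists_end - 1) (plists_start - 1) (-1))

-- ===== PORT B =====
-- Source B's predicate helper
def pvIsItemLine (line : String) : Bool :=
  let t := PySem.Str.strip line
  PySem.Str.startswith t "\"" && (PySem.Str.endswith t "\"" || PySem.Str.endswith t "\",")

-- Source B's comprehension: the matching indices, in forward order
-- (on an index Python's `lines[i]` would raise at, Source B raises; excluded by Pre_, we return [])
def pvMatches (lines : List String) : List Int → List Int
  | [] => []
  | i :: rest =>
    match PySem.List.pyGet? lines i with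
    | none => []
    | some line =>
      if pvIsItemLine line then i :: pvMatches lines rest else pvMatches lines rest

-- `matches[-1] if matches else None`
def find_last_item_line_py_alt (lines : List String) (plists_start : Int) (plists_end : Int) : Option Int :=
  (pvMatches lines (PySem.List.pyRange plists_start plists_end 1)).getLast?

-- ===== PRECONDITION & SPEC =====
-- Pre_ excludes inputs where some visited index is out of Python's range: there A raises
-- IndexError, or (when a high index still matched before the scan reached an out-of-range one)
-- returns early by accident of its backward order while B raises; both are excluded.
def Pre_find_last_item_line_py (lines : List String) (plists_start : Int) (plists_end : Int) : Prop :=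
  plists_end ≤ plists_start ∨
    (-(lines.length : Int) ≤ plists_start ∧ plists_end ≤ (lines.length : Int))
instance (lines : List String) (plists_start : Int) (plists_end : Int) : Decidable (Pre_find_last_item_line_py lines plists_start plists_end) := by unfold Pre_find_last_item_line_py; infer_instance

def pvWitness_find_last_item_line_py : List String × Int × Int := (["\"a\",", "x", "\"b\""], 0, 3)

def Spec_find_last_item_line_py (lines : List String) (plists_start : Int) (plists_end : Int) (out : Option Int) : Prop := out = find_last_item_line_py_alt lines plists_start plists_end
instance (lines : List String) (plists_start : Int) (plists_end : Int) (out : Option Int) : Decidable (Spec_find_last_item_line_py lines plists_start plists_end out) := by unfold Spec_find_last_item_line_py; infer_instance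

-- ===== CLAIM (what is proved, stated in full; the proofs are below) =====
def Claim_equal_find_last_item_line_py : Prop := ∀ (lines : List String) (plists_start : Int) (plists_end : Int), Dom_find_last_item_line_py lines plists_start plists_end → Pre_find_last_item_line_py lines plists_start plists_end → Spec_find_last_item_line_py lines plists_start plists_end (find_last_item_line_py lines plists_start plists_end)

-- ===== LEMMAS AND PROOFS =====

-- the collected matches distribute over ++ when every index in the first part is readable
theorem pvMatches_append (lines : List String) (l1 l2 : List Int)
    (h : ∀ i ∈ l1, (PySem.List.pyGet? lines i).isSome) :
    pvMatches lines (l1 ++ l2) = pvMatches lines l1 ++ pvMatches lines l2 := by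
  induction l1 with
  | nil => simp [pvMatches]
  | cons i rest ih =>
    obtain ⟨line, hline⟩ := Option.isSome_iff_exists.mp (h i (by simp))
    have hrest : ∀ j ∈ rest, (PySem.List.pyGet? lines j).isSome := fun j hj => h j (by simp [hj])
    simp only [List.cons_append, pvMatches, hline, ih hrest]
    split_ifs <;> simp

-- A's early-return scan of a list is the last collected match of the reversed list
theorem pvLoopA_eq_getLast (lines : List String) (l : List Int)
    (h : ∀ i ∈ l, (PySem.List.pyGet? lines i).isSome) :
    pvLoopA lines l = (pvMatches lines l.reverse).getLast? := by
  induction l with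
  | nil => simp [pvLoopA, pvMatches]
  | cons i rest ih =>
    obtain ⟨line, hline⟩ := Option.isSome_iff_exists.mp (h i (by simp))
    have hrest : ∀ j ∈ rest, (PySem.List.pyGet? lines j).isSome := fun j hj => h j (by simp [hj])
    have hrev : ∀ j ∈ rest.reverse, (PySem.List.pyGet? lines j).isSome := by
      intro j hj; exact hrest j (List.mem_reverse.mp hj)
    rw [List.reverse_cons, pvMatches_append lines _ _ hrev]
    simp only [pvLoopA, hline, ih hrest]
    have hsingle : pvMatches lines [i] = if pvIsItemLine line then [i] else [] := by
      simp [pvMatches, hline]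
    have hiff : pvIsItemLine line =
        ((PySem.Str.startswith (PySem.Str.strip line) "\"" &&
          PySem.Str.endswith (PySem.Str.strip line) "\"") ||
         (PySem.Str.startswith (PySem.Str.strip line) "\"" &&
          PySem.Str.endswith (PySem.Str.strip line) "\",")) := by
      unfold pvIsItemLine; simp [Bool.and_or_distrib_left]
    rw [hsingle, hiff]
    cases PySem.Str.startswith (PySem.Str.strip line) "\"" <;>
      cases PySem.Str.endswith (PySem.Str.strip line) "\"" <;>
        cases PySem.Str.endswith (PySem.Str.strip line) "\"," <;>
          simp [List.getLast?_concat]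

-- ===== VERDICT (by name: the statement is the Claim_ definition above) =====
theorem find_last_item_line_py_spec : Claim_equal_find_last_item_line_py := by
  intro lines s e _ hpre
  unfold Spec_find_last_item_line_py find_last_item_line_py find_last_item_line_py_alt
  have hrange : PySem.List.pyRange (e - 1) (s - 1) (-1) = (PySem.List.pyRange s e 1).reverse := by
    have := PySem.List.pyRange_neg_one_eq_reverse (e - 1) (s - 1)
    simpa using this
  have h : ∀ i ∈ (PySem.List.pyRange s e 1).reverse, (PySem.List.pyGet? lines i).isSome := by
    intro i hi
    rw [List.mem_reverse, PySem.List.mem_pyRange_one] at hi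
    rcases hpre with hle | ⟨h1, h2⟩
    · omega
    · cases hn : PySem.List.pyGet? lines i with
      | some _ => simp
      | none => exact absurd (show PySem.Raise.InRange lines.length i by unfold PySem.Raise.InRange; omega) ((PySem.List.pyGet?_eq_none_iff lines i).mp hn)
  rw [hrange, pvLoopA_eq_getLast lines _ h, List.reverse_reverse]
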